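-- pv_equiv track=rewrite | github.com/PVSSukeerthi/ASIC_project_team16 | Hardware_architecture/LDPC_codes_v2/iams_golden_ref.py | cn_update_ms
-- ===== SOURCE A (Python) =====
-- from typing import List, Tuple
--
-- def cn_update_ms(betas: List[int]) -> List[int]:
--     """MS: eq (4) - alpha = tau * min_{n'!=n}|beta|"""
--     dc = len(betas)
--     mags = [abs(b) for b in betas]
--     # sort to find min1, min2
--     sorted_mags = sorted(enumerate(mags), key=lambda x: x[1])
--     min1, idx1 = sorted_mags[0][1], sorted_mags[0][0]
--     min2, idx2 = sorted_mags[1][1], sorted_mags[1][0]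
--     total_sign = sum(1 for b in betas if b < 0) % 2  # XOR of signs
--
--     alphas = []
--     for n in range(dc):
--         extr_sign = (total_sign + (1 if betas[n] < 0 else 0)) % 2
--         out_mag = min2 if n == idx1 else min1
--         alphas.append(-out_mag if extr_sign else out_mag)
--     return alphas
-- ===== SOURCE B (Python) =====
-- from typing import List
--
-- def cn_update_ms(betas: List[int]) -> List[int]:
--     """MS check-node update via one linear scan for the two smallest magnitudes."""
--     mags = [abs(b) for b in betas]
--     if mags[0] <= mags[1]:
--         idx1, min1, min2 = 0, mags[0], mags[1]
--     else:
--         idx1, min1, min2 = 1, mags[1], mags[0]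
--     for i, m in enumerate(mags[2:], 2):
--         if m < min1:
--             idx1, min1, min2 = i, m, min1
--         elif m < min2:
--             min2 = m
--     neg = len([b for b in betas if b < 0]) % 2 == 1
--     return [-(min2 if i == idx1 else min1) if (neg != (b < 0)) else (min2 if i == idx1 else min1)
--             for i, b in enumerate(betas)]
-- ===== Notes on version B (the rewrite author's own statement) =====
-- stated objective: faster
-- what changed: A sorts the (index, magnitude) pairs to find the two smallest magnitudes; B finds them with a single linear scan that tracks (idx1, min1, min2), removing the sort entirely.
-- outside the precondition, e.g. on cn_update_ms([5]): A raises IndexError, B raises IndexError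
import Mathlib
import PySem

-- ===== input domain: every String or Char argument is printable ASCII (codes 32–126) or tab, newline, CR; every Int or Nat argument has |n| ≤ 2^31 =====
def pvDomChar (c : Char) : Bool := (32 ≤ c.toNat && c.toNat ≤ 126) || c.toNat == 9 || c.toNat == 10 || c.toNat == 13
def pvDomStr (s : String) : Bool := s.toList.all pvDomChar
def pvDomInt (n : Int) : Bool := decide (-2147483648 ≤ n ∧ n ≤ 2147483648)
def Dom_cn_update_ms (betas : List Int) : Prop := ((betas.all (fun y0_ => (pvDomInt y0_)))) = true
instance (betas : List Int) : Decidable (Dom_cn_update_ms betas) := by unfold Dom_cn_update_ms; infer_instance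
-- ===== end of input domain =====

-- B replaces A's sort of (index, magnitude) pairs by a single linear scan that tracks the two
-- smallest magnitudes and the position of the smallest; return values agree on lists of length ≥ 2.

-- ===== PORT A =====
-- literal port of Source A: sort enumerate(mags) by magnitude, take the two smallest, then emit signs
def cn_update_ms (betas : List Int) : List Int :=
  let dc : Int := betas.length
  let mags : List Int := betas.map (fun b => if b < 0 then -b else b)   -- abs(b), exact for Int
  let sorted_mags := PySem.List.sorted (PySem.List.enumerate mags 0) (fun x => x.2) false
  match PySem.List.pyGet? sorted_mags 0, PySem.List.pyGet? sorted_mags 1 with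
  | some e0, some e1 =>
    let min1 := e0.2
    let idx1 := e0.1
    let min2 := e1.2   -- idx2 = e1.1 is bound by the Python but never used
    let total_sign : Int := (betas.foldl (fun acc b => acc + (if b < 0 then 1 else 0)) 0) % 2
    (PySem.List.pyRange 0 dc 1).foldl (fun acc n =>
      let extr_sign := (total_sign + (if PySem.List.pyGetD betas n 0 < 0 then 1 else 0)) % 2
      let out_mag := if n == idx1 then min2 else min1
      acc ++ [if extr_sign ≠ 0 then -out_mag else out_mag]) []
  | _, _ => []   -- IndexError (fewer than 2 betas): excluded by Pre_

-- ===== PORT B =====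
-- one scan step of Source B's loop: state = (idx1, min1, min2), item = (i, m)
def bStep (s : Int × Int × Int) (p : Int × Int) : Int × Int × Int :=
  if p.2 < s.2.1 then (p.1, p.2, s.2.1)
  else if p.2 < s.2.2 then (s.1, s.2.1, p.2)
  else s

def cn_update_ms_alt (betas : List Int) : List Int :=
  let mags : List Int := betas.map (fun b => if b < 0 then -b else b)
  match mags with
  | m0 :: m1 :: rest =>
    let init : Int × Int × Int := if m0 ≤ m1 then (0, m0, m1) else (1, m1, m0)
    let st := (PySem.List.enumerate rest 2).foldl bStep init
    let neg : Bool := (betas.filter (fun b => b < 0)).length % 2 == 1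
    (PySem.List.enumerate betas 0).map (fun q =>
      let m := if q.1 == st.1 then st.2.2 else st.2.1
      if neg != decide (q.2 < 0) then -m else m)
  | _ => []   -- IndexError (fewer than 2 betas): excluded by Pre_

-- ===== PRECONDITION & SPEC =====
-- Pre_ excludes lists with fewer than two elements, on which A raises IndexError (sorted_mags[1]).
def Pre_cn_update_ms (betas : List Int) : Prop := 2 ≤ betas.length
instance (betas : List Int) : Decidable (Pre_cn_update_ms betas) := by unfold Pre_cn_update_ms; infer_instance
def pvWitness_cn_update_ms : List Int := [3, -1, 2]
def Spec_cn_update_ms (betas : List Int) (out : List Int) : Prop := out = cn_update_ms_alt betas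
instance (betas : List Int) (out : List Int) : Decidable (Spec_cn_update_ms betas out) := by unfold Spec_cn_update_ms; infer_instance

-- ===== CLAIM (what is proved, stated in full; the proofs are below) =====
def Claim_equal_cn_update_ms : Prop := ∀ (betas : List Int), Dom_cn_update_ms betas → Pre_cn_update_ms betas → Spec_cn_update_ms betas (cn_update_ms betas)

-- ===== LEMMAS AND PROOFS =====

-- invariant of B's scan after the first t positions of mags have been seen:
-- st = (idx1, min1, min2) with idx1 < t holding min1, min1 ≤ min2, every other seen
-- position ≥ min2, and min2 attained at a seen position other than idx1
def ScanInv (mags : List Int) (t : Nat) (st : Int × Int × Int) : Prop :=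
  ∃ k : Nat, st.1 = (k : Int) ∧ k < t ∧ t ≤ mags.length ∧
    mags.getD k 0 = st.2.1 ∧ st.2.1 ≤ st.2.2 ∧
    (∀ j, j < t → j ≠ k → st.2.2 ≤ mags.getD j 0) ∧
    (∃ j, j < t ∧ j ≠ k ∧ mags.getD j 0 = st.2.2)

lemma scanInv_step (mags : List Int) (t : Nat) (st : Int × Int × Int) (x : Int)
    (hx : mags.getD t 0 = x) (ht : t < mags.length) (h : ScanInv mags t st) :
    ScanInv mags (t + 1) (bStep st ((t : Int), x)) := by
  obtain ⟨k, hk1, hkt, _, hval, hle, hub, j0, hj0, hj0k, hj0v⟩ := h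
  unfold bStep
  by_cases h1 : x < st.2.1
  · refine ⟨t, by simp [h1], by omega, by omega, by simpa [h1] using hx, ?_, ?_, k, by omega, by omega, ?_⟩
    · simp [h1]; omega
    · intro j hj hjk
      simp only [h1, if_pos]
      rcases eq_or_ne j k with rfl | hne
      · exact le_of_eq hval.symm
      · exact le_trans hle (hub j (by omega) hne)
    · simpa [h1] using hval
  · by_cases h2 : x < st.2.2
    · refine ⟨k, by simp [h1, h2, hk1], by omega, by omega, by simpa [h1, h2] using hval, ?_, ?_, t, by omega, by omega, ?_⟩
      · simp [h1, h2]; omega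
      · intro j hj hjk
        simp only [h1, h2, if_neg, if_pos, not_false_iff]
        rcases eq_or_ne j t with rfl | hne
        · exact le_of_eq hx.symm
        · exact le_trans (le_of_lt h2) (hub j (by omega) hjk)
      · simpa [h1, h2] using hx
    · refine ⟨k, by simp [h1, h2, hk1], by omega, by omega, by simpa [h1, h2] using hval, by simpa [h1, h2] using hle, ?_, j0, by omega, hj0k, by simpa [h1, h2] using hj0v⟩
      intro j hj hjk
      simp only [h1, h2, if_neg, not_false_iff]
      rcases eq_or_ne j t with rfl | hne
      · rw [hx]; omega
      · exact hub j (by omega) hjk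

lemma scanInv_fold (mags : List Int) (l : List Int) (t : Nat) (st : Int × Int × Int)
    (hdrop : mags.drop t = l) (h : ScanInv mags t st) :
    ScanInv mags (t + l.length) ((PySem.List.enumerate l (t : Int)).foldl bStep st) := by
  induction l generalizing t st with
  | nil => simpa using h
  | cons x l' ih =>
    have hlen : t < mags.length := by
      have := congrArg List.length hdrop
      simp [List.length_drop] at this
      omega
    have hx : mags.getD t 0 = x := by
      have h0 : (mags.drop t)[0]? = some x := by rw [hdrop]; rfl
      rw [List.getElem?_drop] at h0
      simp only [Nat.add_zero] at h0
      simp [List.getD_eq_getElem?_getD, h0]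
    have hdrop' : mags.drop (t + 1) = l' := by
      have : mags.drop (t + 1) = (mags.drop t).drop 1 := by
        rw [List.drop_drop]
      rw [this, hdrop]
      rfl
    rw [PySem.List.enumerate_cons, List.foldl_cons]
    have hstep := scanInv_step mags t st x hx hlen h
    have := ih (t + 1) (bStep st ((t : Int), x)) hdrop' hstep
    have hcast : ((t : Int) + 1) = ((t + 1 : Nat) : Int) := by push_cast; ring
    rw [hcast]
    have harith : t + (l'.length + 1) = (t + 1) + l'.length := by omega
    simpa [harith] using this

-- the 0/1-sum A computes is the count of negatives
lemma foldl_count_neg (betas : List Int) (c : Int) :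
    betas.foldl (fun acc b => acc + (if b < 0 then 1 else 0)) c
      = c + (betas.countP (fun b => decide (b < 0)) : Int) := by
  induction betas generalizing c with
  | nil => simp
  | cons b bs ih =>
    rw [List.foldl_cons, ih, List.countP_cons]
    by_cases hb : b < 0 <;> simp [hb] <;> push_cast <;> ring

-- A's integer-parity sign agrees with B's boolean-parity sign
lemma sign_branch_eq (c : Nat) (b m : Int) :
    (if ((c : Int) % 2 + (if b < 0 then 1 else 0)) % 2 ≠ 0 then -m else m)
      = (if (((c % 2 == 1) : Bool) != decide (b < 0)) then -m else m) := by
  have hc : ((c : Int) % 2) = ((c % 2 : Nat) : Int) := by push_cast; ring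
  rcases Nat.mod_two_eq_zero_or_one c with h | h <;>
    by_cases hb : b < 0 <;> simp [hc, h, hb]

-- a list that is a pairwise-≤ permutation of mags starting M1 :: M2 :: restL: removing any
-- position holding M1 leaves a permutation of M2 :: restL
lemma eraseIdx_perm_tail (mags restL : List Int) (M1 M2 : Int)
    (hperm : (M1 :: M2 :: restL).Perm mags) (k : Nat) (hk : k < mags.length)
    (hval : mags[k] = M1) :
    (mags.eraseIdx k).Perm (M2 :: restL) := by
  have h1 : mags.Perm (mags[k] :: mags.erase mags[k]) :=
    List.perm_cons_erase (List.getElem_mem hk)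
  have h2 : (mags.erase mags[k]).Perm (mags.eraseIdx k) := List.erase_getElem hk
  have h3 : (M1 :: M2 :: restL).Perm (M1 :: mags.eraseIdx k) := by
    refine hperm.trans (h1.trans ?_)
    rw [hval] at h2 ⊢
    exact h2.cons M1
  exact h3.cons_inv.symm

-- A's loop appends one element per index: it is a map over the range
lemma foldl_append_map (f : Int → Int) (l : List Int) (init : List Int) :
    l.foldl (fun acc n => acc ++ [f n]) init = init ++ l.map f := by
  induction l generalizing init with
  | nil => simp
  | cons x xs ih => simp [ih]

theorem cn_update_ms_spec : Claim_equal_cn_update_ms := by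
  unfold Claim_equal_cn_update_ms
  intro betas _hdom hpre
  unfold Pre_cn_update_ms at hpre
  unfold Spec_cn_update_ms
  simp only [cn_update_ms, cn_update_ms_alt]
  rcases hE : betas.map (fun b : Int => if b < 0 then -b else b) with _ | ⟨m0, _ | ⟨m1, rest⟩⟩
  · exfalso
    have h := congrArg List.length hE
    simp only [List.length_map, List.length_nil] at h
    omega
  · exfalso
    have h := congrArg List.length hE
    simp only [List.length_map, List.length_cons, List.length_nil] at h
    omega
  have hblen : betas.length = 2 + rest.length := by
    have h := congrArg List.length hE
    simp only [List.length_map, List.length_cons] at h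
    omega
  -- ===== A side: the sorted list =====
  set s := PySem.List.sorted (PySem.List.enumerate (m0 :: m1 :: rest) 0) (fun x => x.2) false with hs
  have hslen : s.length = 2 + rest.length := by
    simp [hs, PySem.List.length_sorted, PySem.List.length_enumerate]
    omega
  have h0lt : 0 < s.length := by omega
  have h1lt : 1 < s.length := by omega
  have hg0 : PySem.List.pyGet? s (0 : Int) = some s[0] := by
    simpa using PySem.List.pyGet?_ofNat s 0 h0lt
  have hg1 : PySem.List.pyGet? s (1 : Int) = some s[1] := by
    simpa using PySem.List.pyGet?_ofNat s 1 h1lt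
  rw [hg0, hg1]
  dsimp only
  -- L := magnitudes of s, a pairwise-≤ permutation of mags
  have hLperm : (s.map (fun x => x.2)).Perm (m0 :: m1 :: rest) := by
    have h := PySem.List.sorted_perm (PySem.List.enumerate (m0 :: m1 :: rest) 0)
      (fun x : Int × Int => x.2) false
    have h2 := h.map (fun x : Int × Int => x.2)
    simpa [PySem.List.map_snd_enumerate] using h2
  have hLpw : (s.map (fun x => x.2)).Pairwise (· ≤ ·) := by
    rw [hs]
    exact PySem.List.sorted_map_key_pairwise _ _
  rcases hL : s.map (fun x => x.2) with _ | ⟨M1, _ | ⟨M2, restL⟩⟩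
  · exfalso
    have h := congrArg List.length hL
    simp only [List.length_map, List.length_nil] at h
    omega
  · exfalso
    have h := congrArg List.length hL
    simp only [List.length_map, List.length_cons, List.length_nil] at h
    omega
  rw [hL] at hLperm hLpw
  have hM1 : s[0].2 = M1 := by
    have h1 := congrArg (fun l : List Int => l[0]?) hL
    simp at h1
    obtain ⟨a, ha⟩ := h1
    rw [List.getElem?_eq_getElem h0lt] at ha
    rw [Option.some.inj ha]
  have hM2 : s[1].2 = M2 := by
    have h1 := congrArg (fun l : List Int => l[1]?) hL
    simp at h1
    obtain ⟨a, ha⟩ := h1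
    rw [List.getElem?_eq_getElem h1lt] at ha
    rw [Option.some.inj ha]
  have hM12 : M1 ≤ M2 := (List.pairwise_cons.1 hLpw).1 M2 (by simp)
  have hmin : ∀ y ∈ (m0 :: m1 :: rest), M1 ≤ y := by
    intro y hy
    have hyL : y ∈ M1 :: M2 :: restL := hLperm.mem_iff.2 hy
    rcases List.mem_cons.1 hyL with rfl | hy'
    · exact le_refl _
    · exact (List.pairwise_cons.1 hLpw).1 y hy'
  have htail2 : ∀ y ∈ M2 :: restL, M2 ≤ y := by
    intro y hy
    rcases List.mem_cons.1 hy with rfl | hy'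
    · exact le_refl _
    · exact (List.pairwise_cons.1 (List.pairwise_cons.1 hLpw).2).1 y hy'
  -- ===== B side: the scan =====
  set st := (PySem.List.enumerate rest 2).foldl bStep
    (if m0 ≤ m1 then ((0 : Int), m0, m1) else ((1 : Int), m1, m0)) with hst
  have hinit : ScanInv (m0 :: m1 :: rest) 2
      (if m0 ≤ m1 then ((0 : Int), m0, m1) else ((1 : Int), m1, m0)) := by
    by_cases h01 : m0 ≤ m1
    · rw [if_pos h01]
      refine ⟨0, by simp, by omega, by simp only [List.length_cons]; omega, rfl, h01, ?_, 1, by omega, by omega, rfl⟩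
      intro j hj hjk
      interval_cases j
      · exact absurd rfl hjk
      · simp
    · rw [if_neg h01]
      refine ⟨1, by simp, by omega, by simp only [List.length_cons]; omega, rfl, by show m1 ≤ m0; omega, ?_, 0, by omega, by omega, rfl⟩
      intro j hj hjk
      interval_cases j
      · simp
      · exact absurd rfl hjk
  have hfold : ScanInv (m0 :: m1 :: rest) (2 + rest.length) st := by
    have h := scanInv_fold (m0 :: m1 :: rest) rest 2
      (if m0 ≤ m1 then ((0 : Int), m0, m1) else ((1 : Int), m1, m0)) rfl hinit
    simpa [hst] using h
  obtain ⟨kB, hkB1, hkBt, _, hvalB, hleB, hubB, j0, hj0t, hj0k, hj0v⟩ := hfold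
  have hmlen : (m0 :: m1 :: rest).length = 2 + rest.length := by simp; omega
  have hkBlen : kB < (m0 :: m1 :: rest).length := by omega
  have hvalB' : (m0 :: m1 :: rest)[kB] = st.2.1 := by
    rw [← List.getD_eq_getElem (m0 :: m1 :: rest) 0 hkBlen]; exact hvalB
  -- min1 of the scan is M1
  have hm1B : st.2.1 = M1 := by
    refine le_antisymm ?_ (hvalB' ▸ hmin _ (List.getElem_mem hkBlen))
    have hM1mem : M1 ∈ (m0 :: m1 :: rest) := hLperm.mem_iff.1 (by simp)
    obtain ⟨j, hj, hjv⟩ := List.mem_iff_getElem.1 hM1mem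
    rcases eq_or_ne j kB with rfl | hne
    · rw [← hjv, hvalB']
    · have h1 := hubB j (by omega) hne
      rw [List.getD_eq_getElem (m0 :: m1 :: rest) 0 hj, hjv] at h1
      omega
  have hEperm : ((m0 :: m1 :: rest).eraseIdx kB).Perm (M2 :: restL) :=
    eraseIdx_perm_tail (m0 :: m1 :: rest) restL M1 M2 hLperm kB hkBlen (by rw [hvalB', hm1B])
  -- min2 of the scan is M2
  have hm2B : st.2.2 = M2 := by
    refine le_antisymm ?_ ?_
    · have hM2mem : M2 ∈ (m0 :: m1 :: rest).eraseIdx kB := hEperm.mem_iff.2 (by simp)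
      obtain ⟨j, hj, hjne, hjv⟩ := List.mem_eraseIdx_iff_getElem.1 hM2mem
      have h1 := hubB j (by omega) hjne
      rw [List.getD_eq_getElem (m0 :: m1 :: rest) 0 hj, hjv] at h1
      exact h1
    · have hj0len : j0 < (m0 :: m1 :: rest).length := by omega
      have hmem : (m0 :: m1 :: rest)[j0] ∈ (m0 :: m1 :: rest).eraseIdx kB :=
        List.mem_eraseIdx_iff_getElem.2 ⟨j0, hj0len, hj0k, rfl⟩
      have h1 := htail2 _ (hEperm.mem_iff.1 hmem)
      rw [← List.getD_eq_getElem (m0 :: m1 :: rest) 0 hj0len, hj0v] at h1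
      exact h1
  -- A's idx1 is an index holding M1; when M1 < M2 it coincides with the scan's idx1
  have hs0mem : s[0] ∈ PySem.List.enumerate (m0 :: m1 :: rest) 0 :=
    (PySem.List.mem_sorted _ _ _ _).1 (by rw [← hs]; exact List.getElem_mem h0lt)
  obtain ⟨kA, hkA, hkAeq⟩ := (PySem.List.mem_enumerate_iff _ _ _).1 hs0mem
  have hidxA : s[0].1 = (kA : Int) := by rw [hkAeq]; simp
  have hvalA : (m0 :: m1 :: rest)[kA] = M1 := by
    have : s[0].2 = (m0 :: m1 :: rest)[kA] := by rw [hkAeq]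
    rw [← this, hM1]
  have hidx_eq : M1 < M2 → (kA : Int) = st.1 := by
    intro hlt
    have hk : kA = kB := by
      by_contra hne
      have hmem : (m0 :: m1 :: rest)[kA] ∈ (m0 :: m1 :: rest).eraseIdx kB :=
        List.mem_eraseIdx_iff_getElem.2 ⟨kA, hkA, hne, rfl⟩
      have h1 := htail2 _ (hEperm.mem_iff.1 hmem)
      rw [hvalA] at h1
      omega
    rw [hk, hkB1]
  -- ===== assemble the outputs =====
  rw [foldl_append_map, List.nil_append]
  rw [PySem.List.enumerate_eq_map_pyRange betas 0, List.map_map]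
  apply List.map_congr_left
  intro j hj
  simp only [Function.comp_apply]
  rw [foldl_count_neg betas 0, zero_add, ← List.countP_eq_length_filter]
  rw [hidxA, hM1, hM2, hm1B, hm2B]
  have hmageq : (if (j == (kA : Int)) then M2 else M1) = (if (j == st.1) then M2 else M1) := by
    rcases lt_or_eq_of_le hM12 with hlt | heq
    · rw [hidx_eq hlt]
    · rw [← heq]; split_ifs <;> rfl
  rw [hmageq]
  exact sign_branch_eq (betas.countP (fun b => decide (b < 0))) (PySem.List.pyGetD betas j 0) _
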